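-- pv_equiv track=rewrite | github.com/DevashishBhor24/Portfolio | amaz.py | minimum_trips
-- ===== SOURCE A (Python) =====
-- def count_frequency(weights):
--     count = {}
--     for weight in weights:
--         if weight in count:
--             count[weight] += 1
--         else:
--             count[weight] = 1
--     return count
--
-- def sort_weights(count):
--     return sorted(count.keys(), key=lambda x: count[x], reverse=True)
--
-- def minimum_trips(weights):
--     count = count_frequency(weights)
--     sorted_weights = sort_weights(count)
--     trips = 0
--     for weight in sorted_weights:
--         while count[weight] > 0:
--             if count[weight] >= 3:
--                 trips += 1
--                 count[weight] -= 3
--             elif count[weight] >= 2: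
--                 trips += 1
--                 count[weight] -= 2
--             else:
--                 return -1
--     return trips
-- ===== SOURCE B (Python) =====
-- from collections import Counter
--
-- def minimum_trips(weights):
--     trips = 0
--     for n in Counter(weights).values():
--         if n % 3 == 1:
--             return -1
--         trips += -(-n // 3)
--     return trips
-- ===== Notes on version B (the rewrite author's own statement) =====
-- stated objective: simpler
-- what changed: Replaces the dict build, the frequency sort and the per-weight decrement-by-3/2 while loop with a single pass over Counter values using the closed form ceil(n/3), returning -1 exactly when some count is congruent to 1 mod 3.
import Mathlib
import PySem

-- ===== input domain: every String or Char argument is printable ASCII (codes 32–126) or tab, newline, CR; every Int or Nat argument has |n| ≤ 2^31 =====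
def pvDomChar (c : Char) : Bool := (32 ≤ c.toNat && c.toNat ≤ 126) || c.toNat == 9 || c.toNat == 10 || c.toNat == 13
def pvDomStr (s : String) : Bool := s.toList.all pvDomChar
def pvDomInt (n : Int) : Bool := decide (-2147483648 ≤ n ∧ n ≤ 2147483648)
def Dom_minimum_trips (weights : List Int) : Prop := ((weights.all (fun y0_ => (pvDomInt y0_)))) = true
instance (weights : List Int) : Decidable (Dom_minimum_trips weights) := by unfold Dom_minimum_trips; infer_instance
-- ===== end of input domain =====

-- B replaces the dict build, frequency sort and decrement-by-3/2 while loop with one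
-- pass over Counter values using the closed form ceil(n/3) (objective: simpler).

-- ===== PORT A =====
-- count_frequency: dict build with 'if weight in count' branch
def count_frequency (weights : List Int) : PySem.Dict Int Int :=
  weights.foldl
    (fun count weight =>
      if count.contains weight then count.insert weight (count.getD weight 0 + 1)
      else count.insert weight 1)
    PySem.Dict.empty

def sort_weights (count : PySem.Dict Int Int) : List Int :=
  PySem.List.sorted count.keys (fun x => count.getD x 0) true

-- the inner 'while count[weight] > 0' loop: returns none when A returns -1,
-- some t when it adds t trips for this weight
def whileTrips (c : Int) : Option Int :=
  if h : 0 < c then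
    if 3 ≤ c then
      match whileTrips (c - 3) with
      | none => none
      | some t => some (t + 1)
    else if 2 ≤ c then
      match whileTrips (c - 2) with
      | none => none
      | some t => some (t + 1)
    else none
  else some 0
termination_by c.toNat
decreasing_by all_goals omega

-- the 'for weight in sorted_weights' loop with its trips accumulator
def tripsLoop (count : PySem.Dict Int Int) : List Int → Int → Int
  | [], trips => trips
  | w :: rest, trips =>
    match whileTrips (count.getD w 0) with
    | none => -1
    | some t => tripsLoop count rest (trips + t)

def minimum_trips (weights : List Int) : Int :=
  tripsLoop (count_frequency weights) (sort_weights (count_frequency weights)) 0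

-- ===== PORT B =====
-- 'for n in Counter(weights).values()' with the closed form -(-n // 3)
def altLoop : List Int → Int → Int
  | [], trips => trips
  | n :: rest, trips =>
    if PySem.Int.mod n 3 = 1 then -1
    else altLoop rest (trips + (-(PySem.Int.floordiv (-n) 3)))

def minimum_trips_alt (weights : List Int) : Int :=
  altLoop (PySem.Dict.counter weights).values 0

-- ===== PRECONDITION & SPEC =====
def Spec_minimum_trips (weights : List Int) (out : Int) : Prop := out = minimum_trips_alt weights
instance (weights : List Int) (out : Int) : Decidable (Spec_minimum_trips weights out) := by unfold Spec_minimum_trips; infer_instance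

-- ===== CLAIM (what is proved, stated in full; the proofs are below) =====
def Claim_equal_minimum_trips : Prop := ∀ (weights : List Int), Dom_minimum_trips weights → Spec_minimum_trips weights (minimum_trips weights)

-- ===== LEMMAS AND PROOFS =====

-- closed form of the while loop, for nonnegative counts
theorem whileTrips_nat (n : Nat) :
    whileTrips (n : Int) = if (n : Int) % 3 = 1 then none else some (((n : Int) + 2) / 3) := by
  induction n using Nat.strong_induction_on with
  | _ n ih =>
    rw [whileTrips]
    by_cases h1 : (0 : Int) < (n : Int)
    · rw [dif_pos h1]
      by_cases h2 : (3 : Int) ≤ (n : Int)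
      · rw [show ((n : Int) - 3) = ((n - 3 : Nat) : Int) by omega, ih (n - 3) (by omega)]
        rw [if_pos h2]
        by_cases h3 : ((n - 3 : Nat) : Int) % 3 = 1
        · rw [if_pos h3, if_pos (by omega)]
        · rw [if_neg h3, if_neg (show ¬((n : Int) % 3 = 1) by omega)]
          simp only [Option.some.injEq]
          omega
      · rw [if_neg h2]
        by_cases h4 : (2 : Int) ≤ (n : Int)
        · rw [show ((n : Int) - 2) = ((n - 2 : Nat) : Int) by omega, ih (n - 2) (by omega)]
          rw [if_pos h4]
          rw [if_neg (show ¬(((n - 2 : Nat) : Int) % 3 = 1) by omega),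
              if_neg (show ¬((n : Int) % 3 = 1) by omega)]
          simp only [Option.some.injEq]
          omega
        · rw [if_neg h4, if_pos (by omega)]
    · rw [dif_neg h1, if_neg (by omega)]
      simp only [Option.some.injEq]
      omega

theorem whileTrips_closed (c : Int) (hc : 0 ≤ c) :
    whileTrips c = if c % 3 = 1 then none else some ((c + 2) / 3) := by
  obtain ⟨n, rfl⟩ := Int.eq_ofNat_of_zero_le hc
  exact whileTrips_nat n

-- altLoop in closed form: any-bad-count check plus a sum of ceilings
def ceil3 (n : Int) : Int := (n + 2) / 3

theorem altLoop_closed (xs : List Int) (t : Int) (hx : ∀ n ∈ xs, 0 ≤ n) :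
    altLoop xs t =
      if xs.any (fun n => decide (n % 3 = 1)) then -1 else t + (xs.map ceil3).sum := by
  induction xs generalizing t with
  | nil => simp [altLoop]
  | cons n rest ih =>
    have hn : 0 ≤ n := hx n (by simp)
    have hmod : PySem.Int.mod n 3 = n % 3 := PySem.Int.mod_eq_emod_of_pos (by norm_num)
    have hceil : -(PySem.Int.floordiv (-n) 3) = ceil3 n := by
      rw [PySem.Int.neg_floordiv_neg_eq_iff_of_pos (by norm_num)]
      unfold ceil3; constructor <;> omega
    rw [altLoop, hmod, hceil, ih _ (fun m hm => hx m (by simp [hm]))]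
    by_cases h1 : n % 3 = 1
    · simp [h1]
    · by_cases h2 : rest.any (fun n => decide (n % 3 = 1)) <;>
        simp [h1, h2, List.any_cons] <;> ring

-- tripsLoop in the same closed form, over the counts of the visited keys
theorem tripsLoop_closed (d : PySem.Dict Int Int) (ws : List Int) (t : Int)
    (hw : ∀ w ∈ ws, 0 ≤ d.getD w 0) :
    tripsLoop d ws t =
      if (ws.map (fun w => d.getD w 0)).any (fun n => decide (n % 3 = 1)) then -1
      else t + ((ws.map (fun w => d.getD w 0)).map ceil3).sum := by
  induction ws generalizing t with
  | nil => simp [tripsLoop]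
  | cons w rest ih =>
    have h0 : 0 ≤ d.getD w 0 := hw w (by simp)
    rw [tripsLoop, whileTrips_closed _ h0]
    by_cases h1 : d.getD w 0 % 3 = 1
    · simp [h1]
    · rw [if_neg h1]
      simp only
      rw [ih _ (fun m hm => hw m (by simp [hm]))]
      by_cases h2 : (rest.map (fun w => d.getD w 0)).any (fun n => decide (n % 3 = 1)) <;>
        simp [h1, h2, ceil3] <;> ring

-- A's conditional dict build is the Counter
theorem count_frequency_eq_counter (weights : List Int) :
    count_frequency weights = PySem.Dict.counter weights := by
  rw [← PySem.Dict.foldl_insert_getD_add_one_eq_counter]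
  unfold count_frequency
  congr 1
  funext d w
  by_cases h : d.contains w
  · simp [h]
  · have := PySem.Dict.getD_of_not_contains (d := d) (k := w) (d0 := (0 : Int))
      (by simpa using h)
    simp [h, this]

theorem minimum_trips_spec' (weights : List Int) :
    minimum_trips weights = minimum_trips_alt weights := by
  unfold minimum_trips minimum_trips_alt
  rw [count_frequency_eq_counter]
  set d := PySem.Dict.counter weights with hd
  -- counts are nonnegative
  have hcount : ∀ w : Int, d.getD w 0 = (weights.count w : Int) := by
    intro w; simpa [hd] using PySem.Dict.getD_counter (xs := weights) (v := w)
  have hperm : (sort_weights d).Perm d.keys := PySem.List.sorted_perm _ _ _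
  have hvals : d.values = d.keys.map (fun w => d.getD w 0) := by
    have hkeys : d.keys = PySem.Set.ofList weights := by
      simpa [hd] using PySem.Dict.keys_counter (xs := weights)
    have hitems : d.items = (PySem.Set.ofList weights).map
        (fun k => (k, (weights.count k : Int))) := by
      simpa [hd] using PySem.Dict.items_counter (xs := weights)
    show d.items.map (·.2) = _
    rw [hitems, hkeys, List.map_map]
    simp [Function.comp, hcount]
  have hnn : ∀ w ∈ sort_weights d, 0 ≤ d.getD w 0 := by
    intro w _; rw [hcount]; positivity
  rw [tripsLoop_closed d _ 0 hnn,
      altLoop_closed _ 0 (by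
        intro n hn
        rw [hvals] at hn
        obtain ⟨w, _, rfl⟩ := List.mem_map.mp hn
        rw [hcount]; positivity),
      hvals]
  have hmp : ((sort_weights d).map (fun w => d.getD w 0)).Perm
      (d.keys.map (fun w => d.getD w 0)) := hperm.map _
  rw [hmp.any_eq, (hmp.map ceil3).sum_eq]

-- ===== VERDICT (by name: the statement is the Claim_ definition above) =====
theorem minimum_trips_spec : Claim_equal_minimum_trips := by
  intro weights _
  exact minimum_trips_spec' weights
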